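-- pv_equiv track=rewrite | github.com/EvanNingduoZhao/LeetCode | robinhood_karat/access_log.py | access_log_1
-- ===== SOURCE A (Python) =====
-- def access_log_1(logs):
--     if not logs or len(logs)==0:
--         return None
--     userTime={}
--     for log in logs:
--         user = log[1]
--         time = log[0]
--         if user not in userTime:
--             userTime[user] = [time]
--         else:
--             if len(userTime[user])==1:
--                 if time<userTime[user][0]:
--                     userTime[user].insert(0,time)
--                 else:
--                     userTime[user].append(time)
--             else:
--                 if time < userTime[user][0]:
--                     userTime[user][0] = time
--                 if time > userTime[user][1]:
--                     userTime[user][1]=time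
--     for k, v in userTime.items():
--         if len(v)==1:
--             userTime[k].append(v[0])
--     return userTime
-- ===== SOURCE B (Python) =====
-- def access_log_1(logs):
--     if not logs or len(logs) == 0:
--         return None
--     groups = {}
--     for log in logs:
--         groups.setdefault(log[1], []).append(log[0])
--     return {user: [min(times), max(times)] for user, times in groups.items()}
-- ===== Notes on version B (the rewrite author's own statement) =====
-- stated objective: simpler
-- what changed: Replaces the streaming per-user insert/branch extrema maintenance (with a fix-up pass for singletons) by a two-phase decomposition: group all timestamps per user with setdefault, then build the result dict in one comprehension as [min(times), max(times)].
import Mathlib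
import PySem

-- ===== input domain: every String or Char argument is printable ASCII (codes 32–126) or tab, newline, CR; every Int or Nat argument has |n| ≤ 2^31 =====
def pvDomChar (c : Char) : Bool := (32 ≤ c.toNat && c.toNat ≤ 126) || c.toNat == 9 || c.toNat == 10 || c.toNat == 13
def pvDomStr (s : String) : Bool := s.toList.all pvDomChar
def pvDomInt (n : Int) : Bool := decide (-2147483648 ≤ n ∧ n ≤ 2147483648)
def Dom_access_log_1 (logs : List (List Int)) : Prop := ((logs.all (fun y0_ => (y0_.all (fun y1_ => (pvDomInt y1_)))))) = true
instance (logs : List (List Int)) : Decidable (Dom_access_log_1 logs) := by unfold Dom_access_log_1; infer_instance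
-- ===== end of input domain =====

-- B replaces A's streaming per-user extrema maintenance (plus a singleton fix-up pass) by
-- grouping all timestamps per user first and then reducing each group to [min, max]; same cost,
-- chosen for being a simpler decomposition. Equivalence of the RETURN values is proved on inputs
-- where every log entry has at least two elements (elsewhere the Python raises IndexError).

-- log[1] / log[0] of an entry; Pre_ guarantees the index is in range, so the default is never used
def pvUser (log : List Int) : Int := (PySem.List.pyGet? log 1).getD 0
def pvTime (log : List Int) : Int := (PySem.List.pyGet? log 0).getD 0

-- ===== PORT A =====
def stepA (d : PySem.Dict Int (List Int)) (log : List Int) : PySem.Dict Int (List Int) :=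
  let user := pvUser log
  let time := pvTime log
  if d.contains user = false then
    d.insert user [time]
  else
    let v := d.getD user []
    if v.length == 1 then
      if time < (PySem.List.pyGet? v 0).getD 0 then
        d.insert user (PySem.List.insert v 0 time)
      else
        d.insert user (v ++ [time])
    else
      let v1 := if time < (PySem.List.pyGet? v 0).getD 0 then v.set 0 time else v
      let v2 := if (PySem.List.pyGet? v1 1).getD 0 < time then v1.set 1 time else v1
      d.insert user v2

def access_log_1 (logs : List (List Int)) : Option (List (Int × List Int)) :=
  if logs.isEmpty || logs.length == 0 then none
  else
    let d := logs.foldl stepA PySem.Dict.empty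
    let d2 := d.items.foldl (fun d' kv =>
      if kv.2.length == 1 then d'.insert kv.1 (kv.2 ++ [(PySem.List.pyGet? kv.2 0).getD 0]) else d') d
    some d2.items

-- ===== PORT B =====
def access_log_1_alt (logs : List (List Int)) : Option (List (Int × List Int)) :=
  if logs.isEmpty || logs.length == 0 then none
  else
    let g := logs.foldl (fun d log => d.modify (pvUser log) [] (· ++ [pvTime log])) PySem.Dict.empty
    some (g.items.map (fun kv =>
      (kv.1, [(PySem.List.min? kv.2 (fun y => y)).getD 0, (PySem.List.max? kv.2 (fun y => y)).getD 0])))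

-- ===== PRECONDITION & SPEC =====
-- Pre_ excludes exactly the entries shorter than 2 elements, on which the Python A raises IndexError (log[1]).
def Pre_access_log_1 (logs : List (List Int)) : Prop := ∀ l ∈ logs, 2 ≤ l.length
instance (logs : List (List Int)) : Decidable (Pre_access_log_1 logs) := by unfold Pre_access_log_1; infer_instance
def pvWitness_access_log_1 : List (List Int) := [[1, 10], [5, 20], [0, 10], [3, 10]]
def Spec_access_log_1 (logs : List (List Int)) (out : Option (List (Int × List Int))) : Prop := out = access_log_1_alt logs
instance (logs : List (List Int)) (out : Option (List (Int × List Int))) : Decidable (Spec_access_log_1 logs out) := by unfold Spec_access_log_1; infer_instance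

-- ===== CLAIM (what is proved, stated in full; the proofs are below) =====
def Claim_equal_access_log_1 : Prop := ∀ (logs : List (List Int)), Dom_access_log_1 logs → Pre_access_log_1 logs → Spec_access_log_1 logs (access_log_1 logs)

-- ===== LEMMAS AND PROOFS =====

-- the per-user timestamp list, in log order
def pvTms (logs : List (List Int)) (u : Int) : List Int :=
  (logs.filter (fun l => pvUser l == u)).map pvTime

-- A's intermediate per-user value: the single time, or the running [min, max]
def pvReduce (ts : List Int) : List Int :=
  match ts with
  | [] => []
  | a :: rest => if rest = [] then [a] else [rest.foldl min a, rest.foldl max a]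

-- the invariant tying A's dict to the per-user timestamp lists h
def pvINV (d : PySem.Dict Int (List Int)) (h : Int → List Int) : Prop :=
  ∀ u, d.get? u = if h u = [] then none else some (pvReduce (h u))

lemma pv_foldl_min_le (t : List Int) (a : Int) : t.foldl min a ≤ a := by
  induction t generalizing a with
  | nil => exact le_refl a
  | cons b t ih => exact le_trans (ih (min a b)) (min_le_left a b)

lemma pv_reduce_snoc (a : Int) (rest : List Int) (t : Int) :
    pvReduce ((a :: rest) ++ [t]) = [min (rest.foldl min a) t, max (rest.foldl max a) t] := by
  simp only [List.cons_append, pvReduce, List.append_eq_nil_iff, List.cons_ne_self,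
    List.foldl_append, List.foldl_cons, List.foldl_nil]
  simp

lemma stepA_INV (d : PySem.Dict Int (List Int)) (h : Int → List Int) (log : List Int)
    (hinv : pvINV d h) :
    pvINV (stepA d log) (fun u => if u = pvUser log then h u ++ [pvTime log] else h u) := by
  intro u
  simp only []
  rcases hU : h (pvUser log) with _ | ⟨a, rest⟩
  · -- fresh key
    have hget : d.get? (pvUser log) = none := by rw [hinv (pvUser log), if_pos hU]
    have hc : d.contains (pvUser log) = false := by
      rw [PySem.Dict.contains_eq_isSome_get?, hget]; rfl
    simp only [stepA, hc, if_true]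
    by_cases hu : u = pvUser log
    · subst hu
      rw [PySem.Dict.get?_insert_self, if_pos rfl, hU]
      simp [pvReduce]
    · rw [PySem.Dict.get?_insert_of_ne _ _ hu, if_neg hu, hinv u]
  · -- existing key
    have hget : d.get? (pvUser log) = some (pvReduce (a :: rest)) := by
      rw [hinv (pvUser log), hU]; simp
    have hc : d.contains (pvUser log) = true := by
      rw [PySem.Dict.contains_eq_isSome_get?, hget]; rfl
    have hv : d.getD (pvUser log) [] = pvReduce (a :: rest) :=
      PySem.Dict.getD_of_get?_eq_some _ _ hget
    have hmain : stepA d log = d.insert (pvUser log)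
        (pvReduce ((a :: rest) ++ [pvTime log])) := by
      rcases hrest : rest with _ | ⟨b, rest'⟩
      · -- singleton value
        subst hrest
        simp only [stepA, hc, Bool.true_eq_false, if_false, hv]
        norm_num [pvReduce]
        split
        · next hlt =>
          have h1 : min a (pvTime log) = pvTime log := by omega
          have h2 : max a (pvTime log) = a := by omega
          simp only [h1, h2]
          rfl
        · next hlt =>
          have h1 : min a (pvTime log) = a := by omega
          have h2 : max a (pvTime log) = pvTime log := by omega
          simp only [h1, h2]
      · -- [mn, mx] value
        have hmnmx : (b :: rest').foldl min a ≤ (b :: rest').foldl max a :=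
          le_trans (pv_foldl_min_le _ a) ((PySem.List.le_foldl_max _ a).1)
        subst hrest
        simp only [stepA, hc, Bool.true_eq_false, if_false, hv]
        rw [pv_reduce_snoc]
        simp only [pvReduce, reduceCtorEq]
        norm_num
        simp only [List.foldl_cons] at hmnmx
        congr 1
        by_cases h1 : pvTime log < List.foldl min (min a b) rest'
        · rw [if_pos h1]
          have e2 : ¬ ((PySem.List.pyGet? [pvTime log, List.foldl max (max a b) rest'] 1).getD 0
              < pvTime log) := by
            simp only [PySem.List.pyGet?, PySem.List.pyIdx?]
            norm_num
            omega
          rw [if_neg e2]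
          have a1 : min (List.foldl min (min a b) rest') (pvTime log) = pvTime log := by omega
          have a2 : max (List.foldl max (max a b) rest') (pvTime log)
              = List.foldl max (max a b) rest' := by omega
          rw [a1, a2]
        · rw [if_neg h1]
          have a1 : min (List.foldl min (min a b) rest') (pvTime log)
              = List.foldl min (min a b) rest' := by omega
          by_cases h2 : List.foldl max (max a b) rest' < pvTime log
          · have e2 : ((PySem.List.pyGet? [List.foldl min (min a b) rest',
                List.foldl max (max a b) rest'] 1).getD 0 < pvTime log) := by
              simp only [PySem.List.pyGet?, PySem.List.pyIdx?]
              norm_num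
              omega
            rw [if_pos e2, a1]
            have a2 : max (List.foldl max (max a b) rest') (pvTime log) = pvTime log := by omega
            rw [a2]
            rfl
          · have e2 : ¬ ((PySem.List.pyGet? [List.foldl min (min a b) rest',
                List.foldl max (max a b) rest'] 1).getD 0 < pvTime log) := by
              simp only [PySem.List.pyGet?, PySem.List.pyIdx?]
              norm_num
              omega
            rw [if_neg e2, a1]
            have a2 : max (List.foldl max (max a b) rest') (pvTime log)
                = List.foldl max (max a b) rest' := by omega
            rw [a2]
    rw [hmain]
    by_cases hu : u = pvUser log
    · subst hu
      rw [PySem.Dict.get?_insert_self, hU]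
      simp
    · rw [PySem.Dict.get?_insert_of_ne _ _ hu, if_neg hu, hinv u]

lemma foldA_INV (logs : List (List Int)) (d : PySem.Dict Int (List Int)) (h : Int → List Int)
    (hinv : pvINV d h) :
    pvINV (logs.foldl stepA d) (fun u => h u ++ pvTms logs u) := by
  induction logs generalizing d h with
  | nil => intro u; simpa [pvTms] using hinv u
  | cons log rest ih =>
    have hstep := stepA_INV d h log hinv
    have hrec := ih (stepA d log) _ hstep
    intro u
    have h2 := hrec u
    have he : (if u = pvUser log then h u ++ [pvTime log] else h u) ++ pvTms rest u
        = h u ++ pvTms (log :: rest) u := by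
      by_cases hu : u = pvUser log
      · subst hu
        simp [pvTms]
      · have hb : (pvUser log == u) = false := by simp [Ne.symm hu]
        simp [pvTms, hb, hu]
    rw [List.foldl_cons]
    simpa [he] using h2

-- every branch of stepA is a dict write at the entry's user
def stepAval (d : PySem.Dict Int (List Int)) (log : List Int) : List Int :=
  let user := pvUser log
  let time := pvTime log
  if d.contains user = false then [time]
  else
    let v := d.getD user []
    if v.length == 1 then
      if time < (PySem.List.pyGet? v 0).getD 0 then PySem.List.insert v 0 time
      else v ++ [time]
    else
      let v1 := if time < (PySem.List.pyGet? v 0).getD 0 then v.set 0 time else v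
      if (PySem.List.pyGet? v1 1).getD 0 < time then v1.set 1 time else v1

lemma stepA_eq : stepA = fun d log => d.insert (pvUser log) (stepAval d log) := by
  funext d log
  simp only [stepA, stepAval]
  split_ifs <;> rfl

def fixstep (d' : PySem.Dict Int (List Int)) (kv : Int × List Int) : PySem.Dict Int (List Int) :=
  if kv.2.length == 1 then d'.insert kv.1 (kv.2 ++ [(PySem.List.pyGet? kv.2 0).getD 0]) else d'

def pvFix (v : List Int) : List Int :=
  if v.length == 1 then v ++ [(PySem.List.pyGet? v 0).getD 0] else v

lemma fix_untouched (l : List (Int × List Int)) (d : PySem.Dict Int (List Int)) (k : Int)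
    (hk : ∀ kv ∈ l, kv.1 ≠ k) : (l.foldl fixstep d).get? k = d.get? k := by
  induction l generalizing d with
  | nil => rfl
  | cons kv t ih =>
    rw [List.foldl_cons, ih _ (fun x hx => hk x (List.mem_cons_of_mem _ hx))]
    unfold fixstep
    split
    · exact PySem.Dict.get?_insert_of_ne _ _ (Ne.symm (hk kv (List.mem_cons_self)))
    · rfl

lemma fix_keys (l : List (Int × List Int)) (d : PySem.Dict Int (List Int))
    (hk : ∀ kv ∈ l, kv.1 ∈ d.keys) : (l.foldl fixstep d).keys = d.keys := by
  induction l generalizing d with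
  | nil => rfl
  | cons kv t ih =>
    rw [List.foldl_cons]
    have hkeys : (fixstep d kv).keys = d.keys := by
      unfold fixstep
      split
      · exact PySem.Dict.keys_insert_of_contains _ _
          ((PySem.Dict.contains_iff_mem_keys _ _).mpr (hk kv (List.mem_cons_self)))
      · rfl
    rw [ih _ (fun x hx => hkeys ▸ hk x (List.mem_cons_of_mem _ hx)), hkeys]

lemma fix_get?_mem (l : List (Int × List Int)) (d : PySem.Dict Int (List Int)) (k : Int) (v : List Int)
    (hnd : (l.map Prod.fst).Nodup) (hmem : (k, v) ∈ l) (hget : d.get? k = some v) :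
    (l.foldl fixstep d).get? k = some (pvFix v) := by
  induction l generalizing d with
  | nil => cases hmem
  | cons kv t ih =>
    rw [List.map_cons, List.nodup_cons] at hnd
    rw [List.foldl_cons]
    rcases List.mem_cons.mp hmem with heq | hmemt
    · subst heq
      have hnot : ∀ x ∈ t, x.1 ≠ k := by
        intro x hx hxk
        have hm := List.mem_map_of_mem hx (f := Prod.fst)
        rw [hxk] at hm
        exact hnd.1 hm
      rw [fix_untouched _ _ _ hnot]
      unfold fixstep pvFix
      split
      · exact PySem.Dict.get?_insert_self _ _ _
      · exact hget
    · have hne : kv.1 ≠ k := by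
        intro h
        have hm := List.mem_map_of_mem hmemt (f := Prod.fst)
        rw [← h] at hm
        exact hnd.1 hm
      have hh : (fixstep d kv).get? k = some v := by
        unfold fixstep
        split
        · rw [PySem.Dict.get?_insert_of_ne _ _ (Ne.symm hne)]; exact hget
        · exact hget
      exact ih _ hnd.2 hmemt hh

lemma gval (logs : List (List Int)) (u : Int) :
    (logs.foldl (fun d log => d.modify (pvUser log) [] (· ++ [pvTime log])) PySem.Dict.empty).getD u []
      = pvTms logs u := by
  rw [← List.foldl_map (f := fun l => (pvUser l, pvTime l))
      (g := fun (d : PySem.Dict Int (List Int)) (p : Int × Int) => d.modify p.1 [] (· ++ [p.2]))]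
  rw [PySem.Dict.getD_foldl_modify_append]
  simp [PySem.Dict.getD_empty, List.filter_map, pvTms, Function.comp_def]

-- ===== VERDICT (by name: the statement is the Claim_ definition above) =====
theorem access_log_1_spec : Claim_equal_access_log_1 := by
  unfold Claim_equal_access_log_1
  intro logs _ _
  unfold Spec_access_log_1 access_log_1 access_log_1_alt
  by_cases hnil : (logs.isEmpty || logs.length == 0) = true
  · rw [if_pos hnil, if_pos hnil]
  · rw [if_neg hnil, if_neg hnil]
    simp only [Option.some.injEq]
    have hINV : pvINV (logs.foldl stepA PySem.Dict.empty) (fun u => pvTms logs u) := by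
      have h0 : pvINV PySem.Dict.empty (fun _ => []) := by
        intro u; simp [PySem.Dict.get?_empty]
      simpa using foldA_INV logs PySem.Dict.empty (fun _ => []) h0
    set d := logs.foldl stepA PySem.Dict.empty with hd
    have hkeysA : d.keys = PySem.Set.ofList (logs.map pvUser) := by
      rw [hd, stepA_eq, PySem.Dict.keys_foldl_insert_key logs pvUser stepAval,
        PySem.Dict.keys_empty, PySem.Set.update_nil_left]
    have hnodA : d.keys.Nodup := by
      rw [hd, stepA_eq]
      exact PySem.Dict.nodup_keys_foldl_insert_key logs pvUser stepAval _ PySem.Dict.nodup_keys_empty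
    set g := logs.foldl (fun d log => d.modify (pvUser log) [] (· ++ [pvTime log]))
      PySem.Dict.empty with hg
    have hkeysB : g.keys = PySem.Set.ofList (logs.map pvUser) := by
      rw [hg, PySem.Dict.keys_foldl_modify_key logs pvUser [] (fun _ log v => v ++ [pvTime log]),
        PySem.Dict.keys_empty, PySem.Set.update_nil_left]
    have hnodB : g.keys.Nodup := by
      rw [hg]
      exact PySem.Dict.nodup_keys_foldl_modify_key logs pvUser [] (fun _ log v => v ++ [pvTime log])
        _ PySem.Dict.nodup_keys_empty
    have hfix : (fun (d' : PySem.Dict Int (List Int)) (kv : Int × List Int) =>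
        if kv.2.length == 1 then d'.insert kv.1 (kv.2 ++ [(PySem.List.pyGet? kv.2 0).getD 0])
        else d') = fixstep := rfl
    rw [hfix]
    set d2 := d.items.foldl fixstep d with hd2
    have hkeys2 : d2.keys = d.keys :=
      fix_keys _ _ (fun kv hkv => PySem.Dict.mem_keys_of_mem_items d hkv)
    have hnod2 : d2.keys.Nodup := hkeys2 ▸ hnodA
    rw [PySem.Dict.items_eq_map_keys d2 hnod2 [], PySem.Dict.items_eq_map_keys g hnodB [],
      hkeys2, hkeysA, hkeysB, List.map_map]
    apply List.map_congr_left
    intro k hk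
    obtain ⟨l0, hl0mem, hl0⟩ := List.mem_map.mp ((PySem.Set.mem_ofList _ _).mp hk)
    have hts : pvTms logs k ≠ [] := by
      intro hcon
      rw [pvTms, List.map_eq_nil_iff, List.filter_eq_nil_iff] at hcon
      exact hcon l0 hl0mem (by simp [hl0])
    rcases hts' : pvTms logs k with _ | ⟨a, rest⟩
    · exact absurd hts' hts
    have hget : d.get? k = some (pvReduce (a :: rest)) := by
      have hk2 := hINV k
      simp only [] at hk2
      rw [hts'] at hk2
      simpa using hk2
    have hndkeys : (d.items.map Prod.fst).Nodup := hnodA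
    have h2get : d2.get? k = some (pvFix (pvReduce (a :: rest))) :=
      fix_get?_mem d.items d k _ hndkeys (PySem.Dict.mem_items_of_get?_eq_some d hget) hget
    have h2getD : d2.getD k [] = pvFix (pvReduce (a :: rest)) :=
      PySem.Dict.getD_of_get?_eq_some _ _ h2get
    have hgv : g.getD k [] = a :: rest := (gval logs k).trans hts'
    simp only [Function.comp_def, h2getD, hgv, Prod.mk.injEq, true_and,
      PySem.List.min?_id_cons, PySem.List.max?_id_cons, Option.getD_some]
    rcases rest with _ | ⟨b, rest'⟩
    · simp [pvReduce, pvFix, PySem.List.pyGet?, PySem.List.pyIdx?]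
    · simp [pvReduce, pvFix]
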